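-- pv_equiv track=rewrite | github.com/Hadelekw/GLiss | mplus/minplus.py | minplus_mult_matrices
-- ===== SOURCE A (Python) =====
-- from numbers import Number
--
-- def minplus_add(*args : Number):
--     return min(args)
--
-- def minplus_mult(*args : Number):
--     return sum(args)
--
-- def minplus_mult_matrices(A : list[list[Number]],
--                           B : list[list[Number]]) -> list[list[Number]]:
--     for k in range(len(B)):
--         if len(A) != len(B[k]):
--             raise Exception('Minplus Mult Error: Matrices aren\'t of size MxN and NxP.')
--     result = [[None for _ in range(len(A[0]))] for __ in range(len(B))]
--     for i in range(len(B)):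
--         for j in range(len(A[0])):
--             result[i][j] = minplus_add(*[minplus_mult(A[k][j], B[i][k]) for k in range(len(A))])
--     return result
-- ===== SOURCE B (Python) =====
-- def minplus_mult_matrices(A, B):
--     for k in range(len(B)):
--         if len(A) != len(B[k]):
--             raise Exception('Minplus Mult Error: Matrices aren\'t of size MxN and NxP.')
--     # seed every entry with the k = 0 term, then accumulate running minima with k as the outer loop
--     result = [[A[0][j] + brow[0] for j in range(len(A[0]))] for brow in B]
--     for k in range(1, len(A)):
--         Ak = A[k]
--         for i, brow in enumerate(B):
--             row = result[i]
--             bik = brow[k]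
--             for j in range(len(row)):
--                 v = Ak[j] + bik
--                 if v < row[j]:
--                     row[j] = v
--     return result
-- ===== Notes on version B (the rewrite author's own statement) =====
-- stated objective: faster
-- what changed: Instead of computing each result entry by building a per-entry list of all n products and calling min on it, B seeds the result with the k=0 term and sweeps k as the outer loop, updating running minima in place (result[i][j] = min(result[i][j], A[k][j]+B[i][k])), eliminating the per-entry temporary lists and the *args helper calls.
import Mathlib
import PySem

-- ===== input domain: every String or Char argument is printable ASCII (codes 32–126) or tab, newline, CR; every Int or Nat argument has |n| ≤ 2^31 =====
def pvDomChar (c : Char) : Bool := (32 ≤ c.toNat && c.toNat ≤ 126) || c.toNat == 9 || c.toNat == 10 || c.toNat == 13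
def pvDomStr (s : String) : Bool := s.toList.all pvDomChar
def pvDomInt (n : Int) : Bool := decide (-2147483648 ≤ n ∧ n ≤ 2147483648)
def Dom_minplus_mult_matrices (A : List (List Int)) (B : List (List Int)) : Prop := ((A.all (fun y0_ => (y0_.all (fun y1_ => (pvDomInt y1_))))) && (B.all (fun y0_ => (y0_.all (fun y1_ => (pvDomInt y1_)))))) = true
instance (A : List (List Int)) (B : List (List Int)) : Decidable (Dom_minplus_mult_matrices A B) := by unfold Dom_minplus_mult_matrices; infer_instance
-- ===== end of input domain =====

-- B replaces A's per-entry list-of-products + min() with a k-outer sweep accumulating running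
-- minima in place (measured constant-factor speedup); equivalence proved on Pre_ (inputs where A returns).


-- ===== PORT A =====
-- The Python size-check loop raises exactly on the inputs Pre_ excludes, so under Pre_ it passes
-- and is not represented.  Indexing uses getD defaults; under Pre_ every index is in range and the
-- min? is over a nonempty list, so the .getD 0 defaults are never consulted.
def minplus_mult_matrices (A : List (List Int)) (B : List (List Int)) : List (List Int) :=
  (List.range B.length).map (fun i =>
    (List.range (A.headD []).length).map (fun j =>
      (((List.range A.length).map (fun k =>
        (A.getD k []).getD j 0 + (B.getD i []).getD k 0)).min?).getD 0))

-- ===== PORT B =====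
-- Source B: seed result with the k = 0 term, then fold k = 1 .. len(A)-1 updating running minima;
-- the in-place i/j loops over result become the two zipWiths over the same rows.
def minplus_mult_matrices_alt (A : List (List Int)) (B : List (List Int)) : List (List Int) :=
  let init := B.map (fun brow =>
    (List.range (A.headD []).length).map (fun j => (A.headD []).getD j 0 + brow.getD 0 0))
  (List.range' 1 (A.length - 1)).foldl (fun res k =>
    List.zipWith (fun row brow =>
      List.zipWith (fun v a =>
        if a + brow.getD k 0 < v then a + brow.getD k 0 else v) row (A.getD k [])) res B) init

-- ===== PRECONDITION & SPEC =====
-- Pre_ excludes exactly the inputs where the Python A raises: a row of B whose length differs from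
-- len(A) (explicit Exception), and, when B is nonempty, A = [] (IndexError/ValueError) or a row of A
-- shorter than A[0] (IndexError).
def Pre_minplus_mult_matrices (A : List (List Int)) (B : List (List Int)) : Prop :=
  (∀ row ∈ B, row.length = A.length) ∧
  (B ≠ [] → A ≠ [] ∧ ∀ row ∈ A, (A.headD []).length ≤ row.length)
instance (A : List (List Int)) (B : List (List Int)) : Decidable (Pre_minplus_mult_matrices A B) := by unfold Pre_minplus_mult_matrices; infer_instance

def pvWitness_minplus_mult_matrices : List (List Int) × List (List Int) := ([[1, 2], [3, 4]], [[5, 6], [7, 8]])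

def Spec_minplus_mult_matrices (A : List (List Int)) (B : List (List Int)) (out : List (List Int)) : Prop := out = minplus_mult_matrices_alt A B
instance (A : List (List Int)) (B : List (List Int)) (out : List (List Int)) : Decidable (Spec_minplus_mult_matrices A B out) := by unfold Spec_minplus_mult_matrices; infer_instance

-- ===== CLAIM (what is proved, stated in full; the proofs are below) =====
def Claim_equal_minplus_mult_matrices : Prop := ∀ (A : List (List Int)) (B : List (List Int)), Dom_minplus_mult_matrices A B → Pre_minplus_mult_matrices A B → Spec_minplus_mult_matrices A B (minplus_mult_matrices A B)

-- ===== LEMMAS AND PROOFS =====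

lemma zipWith_left_id {α β : Type} (l : List α) (bl : List β) (h : l.length ≤ bl.length) :
    List.zipWith (fun r _ => r) l bl = l := by
  induction l generalizing bl with
  | nil => simp
  | cons a l ih =>
    cases bl with
    | nil => simp at h
    | cons b bl => simp_all

lemma zipWith_zipWith_same {α β γ δ : Type} (g : γ → β → δ) (h : α → β → γ)
    (l : List α) (bl : List β) :
    List.zipWith g (List.zipWith h l bl) bl = List.zipWith (fun r b => g (h r b) b) l bl := by
  induction l generalizing bl with
  | nil => simp
  | cons a l ih =>
    cases bl with
    | nil => simp
    | cons b bl => simp [ih]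

-- folding a zipWith-shaped step over a matrix = zipWith of per-row folds
lemma foldl_zipWith {α β γ : Type} (F : γ → α → β → α) (ks : List γ)
    (l : List α) (bl : List β) (h : l.length = bl.length) :
    ks.foldl (fun res k => List.zipWith (fun r b => F k r b) res bl) l
      = List.zipWith (fun r b => ks.foldl (fun r k => F k r b) r) l bl := by
  induction ks generalizing l with
  | nil => simp [zipWith_left_id l bl h.le]
  | cons k ks ih =>
    simp only [List.foldl_cons]
    rw [ih _ (by simp [h]), zipWith_zipWith_same]

lemma zipWith_map_left_same {α β γ : Type} (f : β → α → γ) (g : α → β) (l : List α) :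
    List.zipWith f (l.map g) l = l.map (fun b => f (g b) b) := by
  induction l with
  | nil => rfl
  | cons a l ih => simp [ih]

lemma map_range_getD {α β : Type} (l : List α) (d : α) (F : α → β) :
    (List.range l.length).map (fun i => F (l.getD i d)) = l.map F := by
  apply List.ext_getElem
  · simp
  · intro i h1 h2
    simp only [List.getElem_map, List.getElem_range, List.getD]
    rw [List.getElem?_eq_getElem (by simpa using h2)]
    rfl

lemma zipWith_upd_map_range {m : Nat} (u : Int → Int → Int) (h : Nat → Int)
    (Ak : List Int) (hm : m ≤ Ak.length) :
    List.zipWith u ((List.range m).map h) Ak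
      = (List.range m).map (fun j => u (h j) (Ak.getD j 0)) := by
  apply List.ext_getElem
  · simp [Nat.min_eq_left hm]
  · intro i h1 h2
    simp at h2
    simp only [List.getElem_zipWith, List.getElem_map, List.getElem_range, List.getD]
    rw [List.getElem?_eq_getElem (lt_of_lt_of_le h2 hm)]
    rfl

-- folding per-k row updates over a map-over-range row = map-over-range of per-entry folds
lemma foldl_row_map_range {m : Nat} (u : Nat → Int → Int → Int) (ks : List Nat)
    (A : List (List Int)) (hk : ∀ k ∈ ks, m ≤ (A.getD k []).length) (h : Nat → Int) :
    ks.foldl (fun row k => List.zipWith (u k) row (A.getD k [])) ((List.range m).map h)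
      = (List.range m).map (fun j => ks.foldl (fun v k => u k v ((A.getD k []).getD j 0)) (h j)) := by
  induction ks generalizing h with
  | nil => rfl
  | cons k ks ih =>
    simp only [List.foldl_cons]
    rw [zipWith_upd_map_range (u k) h _ (hk k (by simp))]
    exact ih (fun k hkm => hk k (by simp [hkm])) _

lemma foldl_min_range' (n : Nat) (hn : 0 < n) (w : Nat → Int) :
    (List.range' 1 (n - 1)).foldl (fun v k => if w k < v then w k else v) (w 0)
      = (((List.range n).map w).min?).getD 0 := by
  have hupd : (fun v k => if w k < v then w k else v) = fun v k => min v (w k) := by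
    funext v k
    simp only [min_def]
    split_ifs <;> omega
  have hr : List.range n = 0 :: List.range' 1 (n - 1) := by
    rw [List.range_eq_range']
    cases n with
    | zero => omega
    | succ n => simp [List.range'_succ]
  rw [hr, hupd, List.map_cons, List.min?_cons']
  simp [← List.foldl_map]

lemma headD_eq_getD_zero {α : Type} (l : List α) (d : α) : l.headD d = l.getD 0 d := by
  cases l <;> rfl

-- ===== VERDICT (by name: the statement is the Claim_ definition above) =====
theorem minplus_mult_matrices_spec : Claim_equal_minplus_mult_matrices := by
  intro A B _ hpre
  unfold Spec_minplus_mult_matrices minplus_mult_matrices minplus_mult_matrices_alt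
  obtain ⟨hB, hA⟩ := hpre
  rw [map_range_getD B [] (fun brow =>
      (List.range (A.headD []).length).map (fun j =>
        (((List.range A.length).map (fun k =>
          (A.getD k []).getD j 0 + brow.getD k 0)).min?).getD 0))]
  rw [foldl_zipWith
      (fun k row brow => List.zipWith (fun v a =>
        if a + brow.getD k 0 < v then a + brow.getD k 0 else v) row (A.getD k []))
      (List.range' 1 (A.length - 1)) _ B (by simp)]
  rw [zipWith_map_left_same]
  apply List.map_congr_left
  intro brow hbrow
  have hBne : B ≠ [] := List.ne_nil_of_mem hbrow
  obtain ⟨hAne, hrows⟩ := hA hBne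
  have hn : 0 < A.length := List.length_pos_iff.mpr hAne
  rw [foldl_row_map_range
      (fun k v a => if a + brow.getD k 0 < v then a + brow.getD k 0 else v)
      (List.range' 1 (A.length - 1)) A
      (fun k hk => by
        have hklt : k < A.length := by
          have := List.mem_range'_1.mp hk
          omega
        exact hrows _ (List.getD_eq_getElem A [] hklt ▸ List.getElem_mem hklt))]
  apply List.map_congr_left
  intro j _
  rw [headD_eq_getD_zero A []]
  exact (foldl_min_range' A.length hn
    (fun k => (A.getD k []).getD j 0 + brow.getD k 0)).symm
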